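-- pv_equiv track=rewrite | github.com/grigorusha/Hungarian-Rings | Source/main.py | linked_check
-- ===== SOURCE A (Python) =====
-- def linked_check(linked, ring_num, orbit_num, vek, orbit_format):
--     num = ring_num if orbit_format == 1 else orbit_num
--     pos_link = -1
--     if len(linked) > 0:
--         for n_lin, lin in enumerate(linked):
--             if (num in lin):
--                 pos_link = n_lin
--             if (-num in lin):
--                 pos_link = n_lin
--                 vek *= -1
--     if pos_link >= 0:
--         moved_ring = linked[pos_link]
--     else:
--         moved_ring = [num]
--     return moved_ring, vek
-- ===== SOURCE B (Python) =====
-- def linked_check(linked, ring_num, orbit_num, vek, orbit_format):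
--     num = ring_num if orbit_format == 1 else orbit_num
--     moved_ring = next((lin for lin in reversed(linked) if num in lin or -num in lin),
--                       [num])
--     flips = sum(1 for lin in linked if -num in lin)
--     return moved_ring, (-vek if flips % 2 else vek)
-- ===== Notes on version B (the rewrite author's own statement) =====
-- stated objective: simpler
-- what changed: A's fused left-to-right loop over enumerated indices carrying a (pos_link, vek) accumulator is replaced by index-free staged passes: the moved ring is the first match scanning the reversed list (no indices, no final lookup), and the sign is the parity of a count of sublists containing -num.
import Mathlib
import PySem

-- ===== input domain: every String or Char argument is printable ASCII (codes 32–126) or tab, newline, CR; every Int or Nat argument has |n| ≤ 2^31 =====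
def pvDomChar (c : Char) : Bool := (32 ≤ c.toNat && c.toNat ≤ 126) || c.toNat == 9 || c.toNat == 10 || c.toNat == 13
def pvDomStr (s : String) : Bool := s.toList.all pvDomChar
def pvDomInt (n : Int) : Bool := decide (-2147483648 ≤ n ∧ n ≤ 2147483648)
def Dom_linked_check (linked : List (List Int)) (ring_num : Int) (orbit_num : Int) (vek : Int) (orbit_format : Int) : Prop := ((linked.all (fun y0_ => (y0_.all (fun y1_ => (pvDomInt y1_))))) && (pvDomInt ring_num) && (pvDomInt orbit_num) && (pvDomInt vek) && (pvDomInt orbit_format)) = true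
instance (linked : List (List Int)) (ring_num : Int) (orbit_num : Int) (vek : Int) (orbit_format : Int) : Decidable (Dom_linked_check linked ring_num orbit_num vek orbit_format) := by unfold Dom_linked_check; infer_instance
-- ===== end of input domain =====

-- B replaces A's fused indexed accumulator loop by index-free staged passes: a first-match scan
-- of the reversed list for the moved ring, and a count-parity pass for the sign (objective: simpler).


-- ===== PORT A =====
-- A's loop step over the (pos_link, vek) accumulator; both ifs of the loop body in order.
def stepA (num : Int) (s : Int × Int) (p : Int × List Int) : Int × Int :=
  let s1 := if num ∈ p.2 then (p.1, s.2) else s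
  if -num ∈ p.2 then (p.1, -s1.2) else s1

def linked_check (linked : List (List Int)) (ring_num : Int) (orbit_num : Int) (vek : Int) (orbit_format : Int) : List Int × Int :=
  let num := if orbit_format = 1 then ring_num else orbit_num
  let st : Int × Int :=
    if linked.length > 0 then
      (PySem.List.enumerate linked).foldl (stepA num) (-1, vek)
    else (-1, vek)
  -- linked[pos_link]: pos_link is a valid non-negative index whenever st.1 ≥ 0, so the .getD default is unreachable
  let moved_ring := if st.1 ≥ 0 then (PySem.List.pyGet? linked st.1).getD [] else [num]
  (moved_ring, st.2)

-- ===== PORT B =====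
def linked_check_alt (linked : List (List Int)) (ring_num : Int) (orbit_num : Int) (vek : Int) (orbit_format : Int) : List Int × Int :=
  let num := if orbit_format = 1 then ring_num else orbit_num
  -- next((lin for lin in reversed(linked) if num in lin or -num in lin), [num])
  let moved_ring := (linked.reverse.find? (fun lin => decide (num ∈ lin) || decide (-num ∈ lin))).getD [num]
  let flips := linked.countP (fun lin => decide (-num ∈ lin))
  (moved_ring, if flips % 2 = 1 then -vek else vek)

-- ===== PRECONDITION & SPEC =====
def Spec_linked_check (linked : List (List Int)) (ring_num : Int) (orbit_num : Int) (vek : Int) (orbit_format : Int) (out : List Int × Int) : Prop := out = linked_check_alt linked ring_num orbit_num vek orbit_format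
instance (linked : List (List Int)) (ring_num : Int) (orbit_num : Int) (vek : Int) (orbit_format : Int) (out : List Int × Int) : Decidable (Spec_linked_check linked ring_num orbit_num vek orbit_format out) := by unfold Spec_linked_check; infer_instance

-- ===== CLAIM (what is proved, stated in full; the proofs are below) =====
def Claim_equal_linked_check : Prop := ∀ (linked : List (List Int)) (ring_num : Int) (orbit_num : Int) (vek : Int) (orbit_format : Int), Dom_linked_check linked ring_num orbit_num vek orbit_format → Spec_linked_check linked ring_num orbit_num vek orbit_format (linked_check linked ring_num orbit_num vek orbit_format)

-- ===== LEMMAS AND PROOFS =====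

-- Characterisation of A's fold: the sign is the flip parity, and the index either points at the
-- first match of the reversed list or is -1 when there is no match.
lemma loopA_char (num : Int) (l : List (List Int)) (v : Int) :
    ((PySem.List.enumerate l).foldl (stepA num) (-1, v)).2 =
      (if (l.countP (fun lin => decide (-num ∈ lin))) % 2 = 1 then -v else v) ∧
    -1 ≤ ((PySem.List.enumerate l).foldl (stepA num) (-1, v)).1 ∧
    ((PySem.List.enumerate l).foldl (stepA num) (-1, v)).1 < (l.length : Int) ∧
    (0 ≤ ((PySem.List.enumerate l).foldl (stepA num) (-1, v)).1 →
      ∃ m, l.reverse.find? (fun lin => decide (num ∈ lin) || decide (-num ∈ lin)) = some m ∧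
        PySem.List.pyGet? l ((PySem.List.enumerate l).foldl (stepA num) (-1, v)).1 = some m) ∧
    (((PySem.List.enumerate l).foldl (stepA num) (-1, v)).1 < 0 →
      l.reverse.find? (fun lin => decide (num ∈ lin) || decide (-num ∈ lin)) = none) := by
  induction l using List.reverseRecOn generalizing v with
  | nil => simp [PySem.List.enumerate]
  | append_singleton l a ih =>
    obtain ⟨ih2, ihlo, ihhi, ihsome, ihnone⟩ := ih (v := v)
    have henum : PySem.List.enumerate (l ++ [a]) 0 =
        PySem.List.enumerate l 0 ++ [((l.length : Int), a)] := by
      rw [PySem.List.enumerate_append]; norm_num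
    set st := (PySem.List.enumerate l).foldl (stepA num) (-1, v) with hst
    have hfold : (PySem.List.enumerate (l ++ [a])).foldl (stepA num) (-1, v)
        = stepA num st ((l.length : Int), a) := by
            rw [henum, List.foldl_append, List.foldl_cons, List.foldl_nil, ← hst]
    by_cases hm : -num ∈ a
    · -- a matches via -num: index becomes l.length, sign flips
      have hstepv : stepA num st ((l.length : Int), a) = ((l.length : Int), -st.2) := by
        by_cases hp : num ∈ a <;> simp [stepA, hp, hm]
      refine ⟨?_, ?_, ?_, ?_, ?_⟩ <;> rw [hfold, hstepv] <;> dsimp only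
      · rw [ih2]
        rcases Nat.mod_two_eq_zero_or_one (List.countP (fun lin => decide (-num ∈ lin)) l)
          with h1 | h1 <;>
          simp [List.countP_append, hm, Nat.add_mod, h1]
      · omega
      · simp only [List.length_append, List.length_singleton]; push_cast; omega
      · intro _
        exact ⟨a, by by_cases hq : num ∈ a <;> simp [hq, hm], by simp⟩
      · intro h; exfalso; omega
    · by_cases hp : num ∈ a
      · -- a matches via num only: index becomes l.length, sign unchanged
        have hstepv : stepA num st ((l.length : Int), a) = ((l.length : Int), st.2) := by
          simp [stepA, hp, hm]
        refine ⟨?_, ?_, ?_, ?_, ?_⟩ <;> rw [hfold, hstepv] <;> dsimp only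
        · simpa [List.countP_append, hm] using ih2
        · omega
        · simp only [List.length_append, List.length_singleton]; push_cast; omega
        · intro _
          exact ⟨a, by simp [hp], by simp⟩
        · intro h; exfalso; omega
      · -- a matches neither: everything is inherited from l
        have hstepv : stepA num st ((l.length : Int), a) = st := by simp [stepA, hp, hm]
        have hfind : (l ++ [a]).reverse.find?
            (fun lin => decide (num ∈ lin) || decide (-num ∈ lin)) =
            l.reverse.find? (fun lin => decide (num ∈ lin) || decide (-num ∈ lin)) := by
          simp [hp, hm]
        refine ⟨?_, ?_, ?_, ?_, ?_⟩ <;> rw [hfold, hstepv]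
        · simpa [List.countP_append, hm] using ih2
        · exact ihlo
        · simp only [List.length_append, List.length_singleton]; push_cast; omega
        · intro h
          obtain ⟨m, hf, hg⟩ := ihsome h
          refine ⟨m, by rw [hfind]; exact hf, ?_⟩
          have hlt : st.1.toNat < l.length := by omega
          rw [PySem.List.pyGet?_of_nonneg l h] at hg
          rw [PySem.List.pyGet?_of_nonneg (l ++ [a]) h, List.getElem?_append_left hlt]
          exact hg
        · intro h; rw [hfind]; exact ihnone h

-- ===== VERDICT (by name: the statement is the Claim_ definition above) =====
theorem linked_check_spec : Claim_equal_linked_check := by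
  intro linked ring_num orbit_num vek orbit_format _
  unfold Spec_linked_check linked_check linked_check_alt
  cases linked with
  | nil => simp
  | cons a l =>
    set num := if orbit_format = 1 then ring_num else orbit_num with hnum
    obtain ⟨h2, hlo, hhi, hsome, hnone⟩ := loopA_char num (a :: l) vek
    set st := (PySem.List.enumerate (a :: l)).foldl (stepA num) (-1, vek) with hst
    simp only [List.length_cons, gt_iff_lt, Nat.succ_pos, if_true, ← hst]
    by_cases h : 0 ≤ st.1
    · obtain ⟨m, hf, hg⟩ := hsome h
      rw [if_pos h, hg, hf, h2]
      simp
    · rw [if_neg h, hnone (by omega), h2]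
      simp
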